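-- pv_equiv track=rewrite | github.com/Jeensh/J_alchive | samsung_SW/경사로.py | check_v
-- ===== SOURCE A (Python) =====
-- def check_v(board, i, n, l):
--     # 앞에서부터 탐색
--     count = 1 # 연속된 수의 개수
--     past = board[0][i]
--     j = 1
--     while j < n:
--         now = board[j][i]
--         # 이전 수와 같은 경우
--         if now == past:
--             past = now
--             count += 1
--         # 이전 수보다 1큰 경우
--         elif now - past == 1:
--             # 연속된 이전 수가 경사로 크기보다 같나 큰 경우
--             if count >= l:
--                 past = now
--                 count = 1
--             # 연속된 이전 수가 경사로 크기보다 작은 경우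
--             else:
--                 return False
--         # 이전 수보다 1작은 경우
--         elif now - past == -1:
--             c_tmp = 0
--             for k in range(j, n):
--                 n_tmp = board[k][i]
--                 if n_tmp == now:
--                     c_tmp += 1
--                 if c_tmp >= l:
--                     past = n_tmp
--                     j = k
--                     count = 0
--                     break
--                 if n_tmp != now:
--                     return False
--                 if k == n-1:
--                     return False
--         # 이전 수보다 2이상 크거나 작은 경우
--         else:
--             return False
--         j += 1
--     return True
-- ===== SOURCE B (Python) =====
-- def check_v(board, i, n, l):
--     # Adjacent-pair scan with a used[] array marking ramp-consumed cells,
--     # instead of A's run-length counter plus inner re-scanning loop.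
--     prev = board[0][i]
--     used = [False] * max(n, 0)
--     j = 1
--     while j < n:
--         cur = board[j][i]
--         if cur == prev:
--             j += 1
--         elif cur - prev == 1:
--             # ascent: need l free cells of height prev right behind
--             if any(k < 0 or board[k][i] != prev or used[k]
--                    for k in range(j - 1, j - 1 - l, -1)):
--                 return False
--             for k in range(j - 1, j - 1 - l, -1):
--                 used[k] = True
--             j += 1
--         elif cur - prev == -1:
--             # descent: need l cells of height cur right ahead; consume them
--             if j + l > n or any(board[k][i] != cur for k in range(j, j + l)):
--                 return False
--             for k in range(j, j + l):
--                 used[k] = True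
--             j += max(l, 1)  # move past the consumed ramp (always advance)
--         else:
--             return False
--         prev = cur
--     return True
-- ===== Notes on version B (the rewrite author's own statement) =====
-- stated objective: alternative
-- what changed: B replaces A's run-length counter plus inner re-scanning descent loop by an adjacent-pair scan that maintains a boolean used[] array marking ramp-consumed cells and skips past consumed descents.
-- outside the precondition, e.g. on check_v([[2], [0]], 0, 5, 1): A returns False, B returns False
import Mathlib
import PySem

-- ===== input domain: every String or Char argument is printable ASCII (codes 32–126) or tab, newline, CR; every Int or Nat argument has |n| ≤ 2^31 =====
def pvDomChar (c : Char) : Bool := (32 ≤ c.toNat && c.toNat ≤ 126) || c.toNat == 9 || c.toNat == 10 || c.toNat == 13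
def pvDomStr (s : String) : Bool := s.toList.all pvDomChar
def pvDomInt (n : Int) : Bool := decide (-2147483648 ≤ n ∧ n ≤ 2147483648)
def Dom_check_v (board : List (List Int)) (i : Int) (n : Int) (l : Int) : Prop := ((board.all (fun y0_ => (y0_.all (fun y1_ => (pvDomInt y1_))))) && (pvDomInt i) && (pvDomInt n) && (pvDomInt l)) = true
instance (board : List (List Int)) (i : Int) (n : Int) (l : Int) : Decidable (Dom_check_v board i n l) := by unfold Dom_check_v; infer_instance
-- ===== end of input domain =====

-- B replaces A's run-length counter and inner re-scanning loop by an adjacent-pair scan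
-- over a boolean used[] array marking ramp-consumed cells (objective: alternative).

-- board[k][i], shared cell access (Python raises where this is none; excluded by Pre_)
def pvCol (board : List (List Int)) (i k : Int) : Option Int :=
  (PySem.List.pyGet? board k).bind (fun row => PySem.List.pyGet? row i)

-- ===== PORT A =====
-- the inner 'for k in range(j, n)' loop of the descent branch; t = n - k iterations remain
-- (structural fuel for the range, so t = 0 exactly when the range is exhausted):
-- none = 'return False' (or an IndexError, excluded by Pre_); some (past, j) = the break
def check_v_inner (board : List (List Int)) (i n l now : Int) (c_tmp k : Int) (t : Nat) :
    Option (Int × Int) :=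
  match t with
  | 0 => none  -- range exhausted without break: unreachable (the k == n-1 test fires first)
  | t + 1 =>
    match pvCol board i k with
    | none => none
    | some n_tmp =>
      let c := if n_tmp = now then c_tmp + 1 else c_tmp
      if l ≤ c then some (n_tmp, k)
      else if n_tmp ≠ now then none
      else if k = n - 1 then none
      else check_v_inner board i n l now c (k + 1) t

-- the 'while j < n' loop; j grows by at least 1 per iteration, so fuel n at entry
-- can never run out (the fuel-0 branch is an unreachable totality guard)
def check_v_loop (board : List (List Int)) (i n l : Int) (past count j : Int) (fuel : Nat) :
    Bool :=
  match fuel with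
  | 0 => true
  | fuel + 1 =>
    if j < n then
      match pvCol board i j with
      | none => false   -- IndexError, excluded by Pre_
      | some now =>
        if now = past then check_v_loop board i n l now (count + 1) (j + 1) fuel
        else if now - past = 1 then
          if l ≤ count then check_v_loop board i n l now 1 (j + 1) fuel else false
        else if now - past = -1 then
          match check_v_inner board i n l now 0 j (n - j).toNat with
          | none => false
          | some (p, j') => check_v_loop board i n l p 0 (j' + 1) fuel
        else false
    else true

def check_v (board : List (List Int)) (i : Int) (n : Int) (l : Int) : Bool :=
  match pvCol board i 0 with
  | none => false   -- board[0][i] raises, excluded by Pre_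
  | some past => check_v_loop board i n l past 1 1 n.toNat

-- ===== PORT B =====
-- any(k < 0 or board[k][i] != prev or used[k] for k in range(j-1, j-1-l, -1)), t = max l 0 steps
def pvAscBad (board : List (List Int)) (i prev : Int) (used : List Bool) (k : Int) (t : Nat) :
    Bool :=
  match t with
  | 0 => false
  | t + 1 =>
    (decide (k < 0) || decide (pvCol board i k ≠ some prev) || used.getD k.toNat false)
      || pvAscBad board i prev used (k - 1) t

-- any(board[k][i] != cur for k in range(j, j+l))
def pvDescBad (board : List (List Int)) (i cur k : Int) (t : Nat) : Bool :=
  match t with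
  | 0 => false
  | t + 1 => decide (pvCol board i k ≠ some cur) || pvDescBad board i cur (k + 1) t

-- for k in range(j-1, j-1-l, -1): used[k] = True
def pvMarkDown (used : List Bool) (k : Int) (t : Nat) : List Bool :=
  match t with
  | 0 => used
  | t + 1 => pvMarkDown (used.set k.toNat true) (k - 1) t

-- for k in range(j, j+l): used[k] = True
def pvMarkUp (used : List Bool) (k : Int) (t : Nat) : List Bool :=
  match t with
  | 0 => used
  | t + 1 => pvMarkUp (used.set k.toNat true) (k + 1) t

-- B's 'while j < n' loop; j grows by at least 1 per iteration, so fuel n at entry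
-- can never run out (the fuel-0 branch is an unreachable totality guard)
def check_v_alt_loop (board : List (List Int)) (i n l : Int) (used : List Bool)
    (prev j : Int) (fuel : Nat) : Bool :=
  match fuel with
  | 0 => true
  | fuel + 1 =>
    if j < n then
      match pvCol board i j with
      | none => false   -- IndexError, excluded by Pre_
      | some cur =>
        if cur = prev then check_v_alt_loop board i n l used cur (j + 1) fuel
        else if cur - prev = 1 then
          if pvAscBad board i prev used (j - 1) l.toNat then false
          else check_v_alt_loop board i n l (pvMarkDown used (j - 1) l.toNat) cur (j + 1) fuel
        else if cur - prev = -1 then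
          if decide (n < j + l) || pvDescBad board i cur j l.toNat then false
          else check_v_alt_loop board i n l (pvMarkUp used j l.toNat) cur (j + max l 1) fuel
        else false
    else true

def check_v_alt (board : List (List Int)) (i : Int) (n : Int) (l : Int) : Bool :=
  match pvCol board i 0 with
  | none => false   -- board[0][i] raises, excluded by Pre_
  | some prev => check_v_alt_loop board i n l (List.replicate n.toNat false) prev 1 n.toNat

-- ===== PRECONDITION & SPEC =====
-- Pre_ requires every row index below max(1,n) to be a valid board access with a valid
-- column index i; this over-approximates the cells the programs actually read, so it also
-- excludes some inputs where A happens to return False before reaching an out-of-range cell.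
def Pre_check_v (board : List (List Int)) (i : Int) (n : Int) (l : Int) : Prop :=
  (max 1 n).toNat ≤ board.length ∧
    ∀ k : Nat, k < (max 1 n).toNat → PySem.Raise.InRange (board.getD k []).length i

instance (board : List (List Int)) (i : Int) (n : Int) (l : Int) :
    Decidable (Pre_check_v board i n l) := by unfold Pre_check_v; infer_instance

def pvWitness_check_v : List (List Int) × Int × Int × Int := ([[1], [1], [2]], 0, 3, 1)

def Spec_check_v (board : List (List Int)) (i : Int) (n : Int) (l : Int) (out : Bool) : Prop := out = check_v_alt board i n l
instance (board : List (List Int)) (i : Int) (n : Int) (l : Int) (out : Bool) : Decidable (Spec_check_v board i n l out) := by unfold Spec_check_v; infer_instance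

-- ===== CLAIM (what is proved, stated in full; the proofs are below) =====
def Claim_equal_check_v : Prop := ∀ (board : List (List Int)) (i : Int) (n : Int) (l : Int), Dom_check_v board i n l → Pre_check_v board i n l → Spec_check_v board i n l (check_v board i n l)

-- ===== LEMMAS AND PROOFS =====

-- list-marking helper facts
theorem pvMarkDown_length : ∀ (t : Nat) (used : List Bool) (k : Int),
    (pvMarkDown used k t).length = used.length := by
  intro t
  induction t with
  | zero => intro used k; rfl
  | succ t ih => intro used k; rw [pvMarkDown, ih, List.length_set]

theorem pvMarkUp_length : ∀ (t : Nat) (used : List Bool) (k : Int),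
    (pvMarkUp used k t).length = used.length := by
  intro t
  induction t with
  | zero => intro used k; rfl
  | succ t ih => intro used k; rw [pvMarkUp, ih, List.length_set]

theorem pvGetD_set_ne (xs : List Bool) (a m : Nat) (b d : Bool) (h : a ≠ m) :
    (xs.set a b).getD m d = xs.getD m d := by
  simp [List.getD, List.getElem?_set_ne h]

theorem pvGetD_set_self (xs : List Bool) (a : Nat) (b d : Bool) (h : a < xs.length) :
    (xs.set a b).getD a d = b := by
  simp [List.getD, h]

theorem pvGetD_true_lt (xs : List Bool) (m : Nat) (h : xs.getD m false = true) : m < xs.length := by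
  by_contra hm
  rw [List.getD, List.getElem?_eq_none (by omega)] at h
  simp at h

theorem pvMarkDown_getD_gt : ∀ (t : Nat) (used : List Bool) (k : Int) (m : Nat),
    k.toNat < m → (pvMarkDown used k t).getD m false = used.getD m false := by
  intro t
  induction t with
  | zero => intro used k m _; rfl
  | succ t ih =>
    intro used k m hm
    rw [pvMarkDown, ih _ _ _ (by omega), pvGetD_set_ne _ _ _ _ _ (by omega)]

theorem pvMarkUp_getD_ge : ∀ (t : Nat) (used : List Bool) (k : Int) (m : Nat),
    0 ≤ k → k.toNat + t ≤ m → (pvMarkUp used k t).getD m false = used.getD m false := by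
  intro t
  induction t with
  | zero => intro used k m _ _; rfl
  | succ t ih =>
    intro used k m hk hm
    rw [pvMarkUp, ih _ _ _ (by omega) (by omega), pvGetD_set_ne _ _ _ _ _ (by omega)]

theorem pvMarkDown_preserve_true : ∀ (t : Nat) (used : List Bool) (k : Int) (m : Nat),
    used.getD m false = true → (pvMarkDown used k t).getD m false = true := by
  intro t
  induction t with
  | zero => intro used k m h; exact h
  | succ t ih =>
    intro used k m h
    refine ih _ _ _ ?_
    by_cases hm : k.toNat = m
    · subst hm; exact pvGetD_set_self _ _ _ _ (pvGetD_true_lt _ _ h)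
    · rw [pvGetD_set_ne _ _ _ _ _ hm]; exact h

theorem pvMarkUp_preserve_true : ∀ (t : Nat) (used : List Bool) (k : Int) (m : Nat),
    used.getD m false = true → (pvMarkUp used k t).getD m false = true := by
  intro t
  induction t with
  | zero => intro used k m h; exact h
  | succ t ih =>
    intro used k m h
    refine ih _ _ _ ?_
    by_cases hm : k.toNat = m
    · subst hm; exact pvGetD_set_self _ _ _ _ (pvGetD_true_lt _ _ h)
    · rw [pvGetD_set_ne _ _ _ _ _ hm]; exact h

theorem pvMarkDown_top (t : Nat) (used : List Bool) (k : Int) (ht : 1 ≤ t)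
    (hlen : k.toNat < used.length) : (pvMarkDown used k t).getD k.toNat false = true := by
  obtain ⟨t, rfl⟩ : ∃ t', t = t' + 1 := ⟨t - 1, by omega⟩
  rw [pvMarkDown]
  exact pvMarkDown_preserve_true _ _ _ _ (pvGetD_set_self _ _ _ _ hlen)

theorem pvMarkUp_top : ∀ (t : Nat) (used : List Bool) (k : Int), 1 ≤ t → 0 ≤ k →
    (k + t - 1).toNat < used.length → (pvMarkUp used k t).getD (k + t - 1).toNat false = true := by
  intro t
  induction t with
  | zero => omega
  | succ t ih =>
    intro used k _ hk hlen
    rw [pvMarkUp]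
    by_cases ht : t = 0
    · subst ht
      have : (k + (0 + 1 : Nat) - 1).toNat = k.toNat := by omega
      rw [this] at hlen ⊢
      exact pvMarkUp_preserve_true _ _ _ _ (pvGetD_set_self _ _ _ _ hlen)
    · have heq : (k + 1 + t - 1).toNat = (k + (t + 1 : Nat) - 1).toNat := by push_cast; omega
      have := ih (used.set k.toNat true) (k + 1) (by omega) (by omega)
        (by rw [heq, List.length_set]; exact hlen)
      rw [heq] at this
      exact this

-- scanning helper characterizations
theorem pvAscBad_false_iff (board : List (List Int)) (i prev : Int) (used : List Bool) :
    ∀ (t : Nat) (k : Int), pvAscBad board i prev used k t = false ↔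
      ∀ s : Nat, s < t → 0 ≤ k - s ∧ pvCol board i (k - s) = some prev ∧
        used.getD (k - s).toNat false = false := by
  intro t
  induction t with
  | zero => intro k; simp [pvAscBad]
  | succ t ih =>
    intro k
    rw [pvAscBad]
    simp only [Bool.or_eq_false_iff, decide_eq_false_iff_not, not_not, ih (k - 1)]
    constructor
    · rintro ⟨⟨⟨h1, h2⟩, h3⟩, h4⟩ s hs
      cases s with
      | zero => exact ⟨by omega, by simpa using h2, by simpa using h3⟩
      | succ s =>
        have := h4 s (by omega)
        refine ⟨by omega, ?_, ?_⟩ <;> simp_all [show k - 1 - (s : Int) = k - (s + 1 : Nat) by push_cast; omega]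
    · intro h
      refine ⟨?_, fun s hs => ?_⟩
      · have := h 0 (by omega)
        simp only [Nat.cast_zero, sub_zero] at this
        exact ⟨⟨by omega, this.2.1⟩, this.2.2⟩
      · have := h (s + 1) (by omega)
        simpa [show k - 1 - (s : Int) = k - (s + 1 : Nat) by push_cast; omega] using this

theorem pvDescBad_false_iff (board : List (List Int)) (i cur : Int) :
    ∀ (t : Nat) (k : Int), pvDescBad board i cur k t = false ↔
      ∀ s : Nat, s < t → pvCol board i (k + s) = some cur := by
  intro t
  induction t with
  | zero => intro k; simp [pvDescBad]
  | succ t ih =>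
    intro k
    rw [pvDescBad]
    simp only [Bool.or_eq_false_iff, decide_eq_false_iff_not, not_not, ih (k + 1)]
    constructor
    · rintro ⟨h1, h2⟩ s hs
      cases s with
      | zero => simpa using h1
      | succ s =>
        have := h2 s (by omega)
        simpa [show k + 1 + (s : Int) = k + (s + 1 : Nat) by push_cast; omega] using this
    · intro h
      refine ⟨by simpa using h 0 (by omega), fun s hs => ?_⟩
      have := h (s + 1) (by omega)
      simpa [show k + 1 + (s : Int) = k + (s + 1 : Nat) by push_cast; omega] using this

-- every cell the loops may touch is readable under Pre_
theorem pvPre_col (board : List (List Int)) (i n l : Int) (hpre : Pre_check_v board i n l) :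
    ∀ k : Int, 0 ≤ k → k < max 1 n → ∃ v, pvCol board i k = some v := by
  intro k hk0 hkm
  obtain ⟨hlen, hrow⟩ := hpre
  have hklen : k < (board.length : Int) := by omega
  have hget : PySem.List.pyGet? board k = some board[k.toNat] :=
    PySem.List.pyGet?_eq_some_getElem board hk0 hklen
  have hin : PySem.Raise.InRange board[k.toNat].length i := by
    have := hrow k.toNat (by omega)
    rwa [List.getD_eq_getElem board [] (by omega)] at this
  have : PySem.List.pyGet? board[k.toNat] i ≠ none := fun h =>
    ((PySem.List.pyGet?_eq_none_iff _ _).mp h) hin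
  obtain ⟨v, hv⟩ := Option.ne_none_iff_exists'.mp this
  exact ⟨v, by rw [pvCol, hget, Option.bind_some, hv]⟩

-- the descent scan of A: it succeeds exactly on a full ramp of max(l,1) cells at level `now`
theorem check_v_inner_char (board : List (List Int)) (i n l now : Int)
    (hcol : ∀ k : Int, 0 ≤ k → k < n → ∃ v, pvCol board i k = some v) :
    ∀ (rn : Nat) (c k : Int) (t : Nat), rn = (max (l - c) 1).toNat → t = (n - k).toNat →
      0 ≤ k → k < n → (1 ≤ l - c ∨ pvCol board i k = some now) →
      check_v_inner board i n l now c k t =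
        if k + max (l - c) 1 - 1 < n ∧
            (∀ s : Int, 0 ≤ s → s < max (l - c) 1 → pvCol board i (k + s) = some now)
        then some (now, k + max (l - c) 1 - 1) else none := by
  intro rn
  induction rn with
  | zero => intro c k t hrn _ _ _ _; exfalso; omega
  | succ m ih =>
    intro c k t hrn ht hk0 hkn hfirst
    obtain ⟨t', rfl⟩ : ∃ t', t = t' + 1 := ⟨t - 1, by omega⟩
    obtain ⟨v, hv⟩ := hcol k hk0 hkn
    rw [check_v_inner, hv]
    simp only
    by_cases hvn : v = now
    · have hv' : pvCol board i k = some now := by rw [hv, hvn]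
      rw [if_pos hvn]
      by_cases hlc : l ≤ c + 1
      · have hM : max (l - c) 1 = 1 := by omega
        have hall : ∀ s : Int, 0 ≤ s → s < max (l - c) 1 → pvCol board i (k + s) = some now := by
          intro s h0 h1
          rw [hM] at h1
          have : s = 0 := by omega
          subst this; simpa using hv'
        rw [if_pos hlc, if_pos ⟨by omega, hall⟩, hM, hvn]
        norm_num
      · have hM : max (l - c) 1 = l - c := by omega
        rw [if_neg hlc, if_neg (by simp [hvn])]
        have hM1 : max (l - (c + 1)) 1 = l - c - 1 := by omega
        by_cases hkn1 : k = n - 1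
        · rw [if_pos hkn1, if_neg (fun hc => by have := hc.1; rw [hM] at this; omega)]
        · rw [if_neg hkn1]
          rw [ih (c + 1) (k + 1) t' (by omega) (by omega) (by omega) (by omega)
            (Or.inl (by omega))]
          have hcond : (k + 1 + max (l - (c + 1)) 1 - 1 < n ∧
              (∀ s : Int, 0 ≤ s → s < max (l - (c + 1)) 1 →
                pvCol board i (k + 1 + s) = some now)) ↔
              (k + max (l - c) 1 - 1 < n ∧
              (∀ s : Int, 0 ≤ s → s < max (l - c) 1 → pvCol board i (k + s) = some now)) := by
            rw [hM, hM1]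
            constructor
            · rintro ⟨hlt, hall⟩
              refine ⟨by omega, fun s h0 hs => ?_⟩
              rcases eq_or_lt_of_le h0 with h | h
              · rw [← h]; simpa using hv'
              · have := hall (s - 1) (by omega) (by omega)
                rwa [show k + 1 + (s - 1) = k + s by ring] at this
            · rintro ⟨hlt, hall⟩
              refine ⟨by omega, fun s h0 hs => ?_⟩
              have := hall (s + 1) (by omega) (by omega)
              rwa [show k + (s + 1) = k + 1 + s by ring] at this
          by_cases hC : k + max (l - c) 1 - 1 < n ∧
              (∀ s : Int, 0 ≤ s → s < max (l - c) 1 → pvCol board i (k + s) = some now)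
          · rw [if_pos (hcond.mpr hC), if_pos hC]
            exact congrArg some (congrArg (Prod.mk now) (by rw [hM1, hM]; omega))
          · rw [if_neg (fun h => hC (hcond.mp h)), if_neg hC]
    · have hlc : 1 ≤ l - c := by
        rcases hfirst with h | h
        · exact h
        · rw [hv] at h; exact absurd (Option.some_inj.mp h) hvn
      rw [if_neg hvn, if_neg (by omega), if_pos (by simpa using hvn),
        if_neg (fun h => ?_)]
      exact hvn (Option.some_inj.mp ((h.2 0 le_rfl (by omega)).symm.trans (by simpa using hv)).symm)

-- the simulation invariant tying A's (past, count) to B's used[] array at position j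
def pvInv (board : List (List Int)) (i n l : Int) (used : List Bool)
    (past count j : Int) : Prop :=
  1 ≤ j ∧ 0 ≤ count ∧ used.length = n.toNat ∧
  (∀ t : Int, 0 ≤ t → t < count →
      0 ≤ j - 1 - t ∧ pvCol board i (j - 1 - t) = some past ∧
      used.getD (j - 1 - t).toNat false = false) ∧
  (1 ≤ l →
      j - 1 - count < 0 ∨ used.getD (j - 1 - count).toNat false = true ∨
      pvCol board i (j - 1 - count) ≠ some past) ∧
  (∀ k : Int, j ≤ k → used.getD k.toNat false = false)

theorem pvLoop_eq (board : List (List Int)) (i n l : Int)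
    (hcol : ∀ k : Int, 0 ≤ k → k < n → ∃ v, pvCol board i k = some v) :
    ∀ (fuel : Nat) (used : List Bool) (past count j : Int),
      (j < n → (n - j).toNat ≤ fuel) → pvInv board i n l used past count j →
      check_v_loop board i n l past count j fuel =
        check_v_alt_loop board i n l used past j fuel := by
  intro fuel
  induction fuel with
  | zero => intro used past count j hfuel hinv; rfl
  | succ fuel ih =>
    intro used past count j hfuel hinv
    obtain ⟨hj1, hc0, hlen, hcells, hblock, hfree⟩ := hinv
    by_cases hjn : j < n
    case neg =>
      rw [check_v_loop, check_v_alt_loop, if_neg hjn, if_neg hjn]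
    case pos =>
      obtain ⟨v, hv⟩ := hcol j (by omega) hjn
      rw [check_v_loop, check_v_alt_loop, if_pos hjn, if_pos hjn, hv]
      simp only
      by_cases h1 : v = past
      · subst h1
        rw [if_pos rfl, if_pos rfl]
        refine ih _ _ (count + 1) (j + 1) (fun h => by have := hfuel hjn; omega)
          ⟨by omega, by omega, hlen, fun t h0 h1t => ?_, fun hl => ?_, fun k hk => hfree k (by omega)⟩
        · by_cases ht : t = 0
          · subst ht
            refine ⟨by omega, ?_, ?_⟩
            · rw [show j + 1 - 1 - 0 = j by ring]; exact hv
            · rw [show j + 1 - 1 - 0 = j by ring]; exact hfree j le_rfl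
          · have := hcells (t - 1) (by omega) (by omega)
            rwa [show j - 1 - (t - 1) = j + 1 - 1 - t by ring] at this
        · have := hblock hl
          rwa [show j - 1 - count = j + 1 - 1 - (count + 1) by ring] at this
      · rw [if_neg h1, if_neg h1]
        by_cases h2 : v - past = 1
        · rw [if_pos h2, if_pos h2]
          have hiff : pvAscBad board i past used (j - 1) l.toNat = false ↔ l ≤ count := by
            rw [pvAscBad_false_iff]
            constructor
            · intro hgood
              by_contra hcount
              have hl1 : 1 ≤ l := by omega
              have hb := hblock hl1
              have := hgood count.toNat (by omega)
              rw [show j - 1 - (count.toNat : Int) = j - 1 - count by omega] at this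
              rcases hb with hb | hb | hb
              · omega
              · rw [this.2.2] at hb; exact absurd hb (by simp)
              · exact hb this.2.1
            · intro hl s hs
              have := hcells (s : Int) (by omega) (by omega)
              rwa [show j - 1 - (s : Int) = j - 1 - (s : Int) by ring] at this
          by_cases hl : l ≤ count
          · rw [if_pos hl, if_neg (by rw [hiff.mpr hl]; simp)]
            refine ih _ _ 1 (j + 1) (fun h => by have := hfuel hjn; omega)
              ⟨by omega, by omega, by rw [pvMarkDown_length]; exact hlen,
                fun t h0 h1t => ?_, fun hl1 => ?_, fun k hk => ?_⟩
            · have ht : t = 0 := by omega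
              subst ht
              refine ⟨by omega, ?_, ?_⟩
              · rw [show j + 1 - 1 - 0 = j by ring]; exact hv
              · rw [show j + 1 - 1 - 0 = j by ring,
                  pvMarkDown_getD_gt _ _ _ _ (by omega)]
                exact hfree j le_rfl
            · refine Or.inr (Or.inl ?_)
              rw [show j + 1 - 1 - 1 = j - 1 by ring]
              exact pvMarkDown_top _ _ _ (by omega) (by rw [hlen]; omega)
            · rw [pvMarkDown_getD_gt _ _ _ _ (by omega)]
              exact hfree k (by omega)
          · rw [if_neg hl,
              if_pos (show pvAscBad board i past used (j - 1) l.toNat = true by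
                rcases Bool.eq_false_or_eq_true (pvAscBad board i past used (j - 1) l.toNat)
                  with hb | hb
                · exact hb
                · exact absurd (hiff.mp hb) hl)]
        · rw [if_neg h2, if_neg h2]
          by_cases h3 : v - past = -1
          · rw [if_pos h3, if_pos h3]
            have hchar := check_v_inner_char board i n l v hcol ((max (l - 0) 1).toNat) 0 j
              ((n - j).toNat) rfl rfl (by omega) hjn (Or.inr hv)
            rw [show l - 0 = l by ring] at hchar
            set M := max l 1 with hMdef
            have hM1 : 1 ≤ M := by omega
            have hbool : (decide (n < j + l) || pvDescBad board i v j l.toNat) = false ↔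
                (j + M - 1 < n ∧ ∀ s : Int, 0 ≤ s → s < M → pvCol board i (j + s) = some v) := by
              rw [Bool.or_eq_false_iff, decide_eq_false_iff_not, pvDescBad_false_iff]
              by_cases hl1 : 1 ≤ l
              · have hMl : M = l := by omega
                rw [hMl]
                constructor
                · rintro ⟨ha, hb⟩
                  refine ⟨by omega, fun s h0 hs => ?_⟩
                  have := hb s.toNat (by omega)
                  rwa [show j + (s.toNat : Int) = j + s by omega] at this
                · rintro ⟨ha, hb⟩
                  exact ⟨by omega, fun s hs => hb (s : Int) (by omega) (by omega)⟩
              · have hMo : M = 1 := by omega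
                have hln : l.toNat = 0 := by omega
                rw [hMo, hln]
                constructor
                · rintro ⟨ha, _⟩
                  refine ⟨by omega, fun s h0 hs => ?_⟩
                  have : s = 0 := by omega
                  subst this; simpa using hv
                · intro _
                  exact ⟨by omega, by omega⟩
            by_cases hC : j + M - 1 < n ∧
                ∀ s : Int, 0 ≤ s → s < M → pvCol board i (j + s) = some v
            · have hsome : check_v_inner board i n l v 0 j (n - j).toNat
                  = some (v, j + M - 1) := by
                rw [hchar, if_pos hC]
              rw [if_neg (by rw [hbool.mpr hC]; simp)]
              split
              · rename_i heq
                rw [hsome] at heq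
                exact absurd heq (by simp)
              · rename_i p j' heq
                rw [hsome] at heq
                obtain ⟨hp, hj'⟩ := Prod.mk.injEq .. |>.mp (Option.some_inj.mp heq.symm)
                subst hp
                subst hj'
                rw [show j + M - 1 + 1 = j + M by ring]
                refine ih _ _ 0 (j + M) (fun h => by have := hfuel hjn; omega)
                  ⟨by omega, le_rfl, by rw [pvMarkUp_length]; exact hlen,
                    fun t h0 h1t => absurd h1t (by omega), fun hl1 => ?_, fun k hk => ?_⟩
                · refine Or.inr (Or.inl ?_)
                  have hMl : M = l := by omega
                  rw [show j + M - 1 - 0 = j + (l.toNat : Int) - 1 by omega]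
                  exact pvMarkUp_top l.toNat used j (by omega) (by omega) (by rw [hlen]; omega)
                · rw [pvMarkUp_getD_ge l.toNat used j k.toNat (by omega) (by omega)]
                  exact hfree k (by omega)
            · have hnone : check_v_inner board i n l v 0 j (n - j).toNat = none := by
                rw [hchar, if_neg hC]
              rw [if_pos (show (decide (n < j + l) || pvDescBad board i v j l.toNat) = true by
                rcases Bool.eq_false_or_eq_true
                    (decide (n < j + l) || pvDescBad board i v j l.toNat) with hb | hb
                · exact hb
                · exact absurd (hbool.mp hb) hC)]
              split
              · rfl
              · rename_i p j' heq
                rw [hnone] at heq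
                exact absurd heq (by simp)
          · rw [if_neg h3, if_neg h3]

theorem check_v_spec : Claim_equal_check_v := by
  intro board i n l _hdom hpre
  unfold Spec_check_v check_v check_v_alt
  have hcol : ∀ k : Int, 0 ≤ k → k < n → ∃ v, pvCol board i k = some v := fun k h0 hk =>
    pvPre_col board i n l hpre k h0 (by omega)
  obtain ⟨v, hv⟩ := pvPre_col board i n l hpre 0 le_rfl (by omega)
  rw [hv]
  refine pvLoop_eq board i n l hcol n.toNat _ _ 1 1 (fun _ => by omega) ?_
  refine ⟨le_rfl, by omega, by simp, fun t h0 h1 => ?_, fun _ => Or.inl (by omega), fun k _ => ?_⟩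
  · have : t = 0 := by omega
    subst this
    exact ⟨le_rfl, by simpa using hv, by simp [List.getD]⟩
  · simp [List.getD]
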